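-- pv_equiv track=rewrite | github.com/rajeshmessi10/rajeshmessi10 | Letters Formed from the Longest Word.py | Letters_Formed_from_the_Longest_Word
-- ===== SOURCE A (Python) =====
-- def Letters_Formed_from_the_Longest_Word(list_of_words):
--     new = []
--     for ith in range(len(list_of_words)):
--         word = ""
--         if list_of_words[ith] != max(list_of_words , key = len):
--             for jth in list_of_words[ith]:
--                 if jth in max(list_of_words , key = len):
--                     word += jth
--                 else:
--                     return False
--             if word == list_of_words[ith]:
--                 new.append(True)
--     return all(new)
-- ===== SOURCE B (Python) =====
-- def Letters_Formed_from_the_Longest_Word(list_of_words):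
--     if not list_of_words:
--         return True
--     longest = max(list_of_words, key=len)
--     needed = set()
--     for w in list_of_words:
--         if w != longest:
--             needed |= set(w)
--     return needed <= set(longest)
-- ===== Notes on version B (the rewrite author's own statement) =====
-- stated objective: faster
-- what changed: Replaces A's nested per-word scan (which recomputes max(list_of_words, key=len) for every word and again for every character, rebuilds each word char by char, and early-returns) by computing the longest word once, one pass accumulating the characters of all non-longest words into a set, and a single subset test against the longest word's character set.
import Mathlib
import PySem

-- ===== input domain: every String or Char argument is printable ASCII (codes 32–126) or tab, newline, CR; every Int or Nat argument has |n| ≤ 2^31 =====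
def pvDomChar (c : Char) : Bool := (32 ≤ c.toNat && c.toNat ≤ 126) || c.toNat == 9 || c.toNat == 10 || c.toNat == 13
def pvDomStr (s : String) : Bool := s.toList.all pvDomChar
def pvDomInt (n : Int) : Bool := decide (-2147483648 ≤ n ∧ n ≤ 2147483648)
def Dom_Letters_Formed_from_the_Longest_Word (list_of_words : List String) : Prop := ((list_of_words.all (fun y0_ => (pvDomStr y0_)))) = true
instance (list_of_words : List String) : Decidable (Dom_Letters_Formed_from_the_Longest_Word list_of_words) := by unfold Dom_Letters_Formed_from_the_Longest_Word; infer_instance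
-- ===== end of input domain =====

-- B replaces A's nested per-word scan (repeated max() calls, char-by-char rebuild, early return)
-- by one accumulation pass into a character set plus a single subset test (objective: simpler).

-- ===== PORT A =====
-- inner loop: for jth in list_of_words[ith]: if jth in longest: word += jth else: return False
def pvInnerA (cs : List Char) (longest : List Char) (word : List Char) : Option (List Char) :=
  match cs with
  | [] => some word
  | c :: rest => if longest.contains c then pvInnerA rest longest (word ++ [c]) else none

-- outer loop over the words (Python iterates indices 0..len-1 and reads list_of_words[ith];
-- the elements are visited in the same order); `full` is the unchanged list_of_words from
-- which max(list_of_words, key=len) is recomputed each iteration, `new` is the accumulator list.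
def pvOuterA (rem : List String) (full : List String) (new : List Bool) : Bool :=
  match rem with
  | [] => new.all id
  | w :: rest =>
    match PySem.List.max? full PySem.Str.len with
    | none => false   -- unreachable: full = list_of_words is nonempty whenever the loop body runs
    | some lng =>
      if w ≠ lng then
        match pvInnerA w.toList lng.toList [] with
        | none => false
        | some word =>
          pvOuterA rest full (if word == w.toList then new ++ [true] else new)
      else pvOuterA rest full new

def Letters_Formed_from_the_Longest_Word (list_of_words : List String) : Bool :=
  pvOuterA list_of_words list_of_words []

-- ===== PORT B =====
def Letters_Formed_from_the_Longest_Word_alt (list_of_words : List String) : Bool :=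
  match list_of_words with
  | [] => true
  | x :: rest =>
    match PySem.List.max? (x :: rest) PySem.Str.len with
    | none => true   -- unreachable: the list is nonempty
    | some lng =>
      let needed := (x :: rest).foldl
        (fun s w => if w ≠ lng then PySem.Set.update s w.toList else s) PySem.Set.empty
      PySem.Set.issubset needed (PySem.Set.ofList lng.toList)

-- ===== PRECONDITION & SPEC =====
def Spec_Letters_Formed_from_the_Longest_Word (list_of_words : List String) (out : Bool) : Prop := out = Letters_Formed_from_the_Longest_Word_alt list_of_words
instance (list_of_words : List String) (out : Bool) : Decidable (Spec_Letters_Formed_from_the_Longest_Word list_of_words out) := by unfold Spec_Letters_Formed_from_the_Longest_Word; infer_instance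

-- ===== CLAIM (what is proved, stated in full; the proofs are below) =====
def Claim_equal_Letters_Formed_from_the_Longest_Word : Prop := ∀ (list_of_words : List String), Dom_Letters_Formed_from_the_Longest_Word list_of_words → Spec_Letters_Formed_from_the_Longest_Word list_of_words (Letters_Formed_from_the_Longest_Word list_of_words)

-- ===== LEMMAS AND PROOFS =====

-- the common characterisation: a word is fine iff it is the longest or all its chars occur in it
def pvOK (lng : String) (w : String) : Bool :=
  decide (w = lng) || w.toList.all (fun c => lng.toList.contains c)

theorem pvInnerA_eq (longest : List Char) (cs word : List Char) :
    pvInnerA cs longest word =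
      if cs.all (fun c => longest.contains c) then some (word ++ cs) else none := by
  induction cs generalizing word with
  | nil => simp [pvInnerA]
  | cons c rest ih =>
    by_cases h : c ∈ longest
    · simp [pvInnerA, h, ih]
    · simp [pvInnerA, h]

theorem pvOuterA_eq (full : List String) (lng : String)
    (hmax : PySem.List.max? full PySem.Str.len = some lng) :
    ∀ (rem : List String) (new : List Bool), new.all id = true →
      pvOuterA rem full new = rem.all (pvOK lng) := by
  intro rem
  induction rem with
  | nil => intro new hnew; simpa [pvOuterA] using hnew
  | cons w rest ih =>
    intro new hnew
    simp only [pvOuterA, hmax, List.all_cons]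
    by_cases hw : w = lng
    · rw [if_neg (not_not_intro hw), ih new hnew]
      have hok : pvOK lng w = true := by simp [pvOK, hw]
      rw [hok, Bool.true_and]
    · rw [if_pos hw, pvInnerA_eq]
      by_cases hall : w.toList.all (fun c => lng.toList.contains c) = true
      · rw [if_pos hall]
        simp only [List.nil_append]
        rw [if_pos (by simp), ih (new ++ [true]) (by simp [hnew])]
        have hok : pvOK lng w = true := by simp [pvOK]; right; simpa using hall
        rw [hok, Bool.true_and]
      · rw [if_neg hall]
        have hok : pvOK lng w = false := by
          simp only [pvOK, Bool.or_eq_false_iff]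
          exact ⟨by simp [hw], by simpa using hall⟩
        rw [hok, Bool.false_and]

theorem pv_issubset_add (s t : PySem.Set Char) (c : Char) :
    PySem.Set.issubset (PySem.Set.add s c) t =
      (PySem.Set.issubset s t && t.contains c) := by
  by_cases hc : PySem.Set.contains s c = true
  · simp only [PySem.Set.add, if_pos hc]
    cases hst : PySem.Set.issubset s t with
    | false => rw [Bool.false_and]
    | true =>
      have hcs : c ∈ s := by simpa [PySem.Set.contains] using hc
      have hct : c ∈ t := by
        have hall := hst
        simp only [PySem.Set.issubset, PySem.Set.contains, List.all_eq_true,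
          List.contains_iff_mem] at hall
        exact hall c hcs
      simp [hct]
  · simp only [PySem.Set.add, if_neg hc]
    simp [PySem.Set.issubset, Bool.and_comm]

theorem pv_issubset_update (t : PySem.Set Char) (cs : List Char) :
    ∀ s : PySem.Set Char,
      PySem.Set.issubset (PySem.Set.update s cs) t =
        (PySem.Set.issubset s t && cs.all (fun c => t.contains c)) := by
  induction cs with
  | nil => intro s; simp [PySem.Set.update]
  | cons c rest ih =>
    intro s
    simp only [PySem.Set.update, List.foldl_cons, List.all_cons] at ih ⊢
    rw [ih, pv_issubset_add, Bool.and_assoc]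

theorem pvB_fold_eq (lng : String) (l : List String) :
    ∀ s : PySem.Set Char,
      PySem.Set.issubset
          (l.foldl (fun s w => if w ≠ lng then PySem.Set.update s w.toList else s) s)
          (PySem.Set.ofList lng.toList)
        = (PySem.Set.issubset s (PySem.Set.ofList lng.toList) && l.all (pvOK lng)) := by
  induction l with
  | nil => intro s; simp
  | cons w rest ih =>
    intro s
    simp only [List.foldl_cons, List.all_cons]
    by_cases hw : w = lng
    · rw [show (if w ≠ lng then PySem.Set.update s w.toList else s) = s by simp [hw], ih]
      have hok : pvOK lng w = true := by simp [pvOK, hw]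
      rw [hok, Bool.true_and]
    · rw [show (if w ≠ lng then PySem.Set.update s w.toList else s)
            = PySem.Set.update s w.toList by simp [hw],
          ih, pv_issubset_update]
      have hok : pvOK lng w
          = w.toList.all (fun c => (PySem.Set.ofList lng.toList).contains c) := by
        simp only [pvOK, hw, decide_false, Bool.false_or]
        simp [PySem.Set.mem_ofList]
      rw [hok, Bool.and_assoc]

-- ===== VERDICT (by name: the statement is the Claim_ definition above) =====
theorem Letters_Formed_from_the_Longest_Word_spec : Claim_equal_Letters_Formed_from_the_Longest_Word := by
  intro xs _
  unfold Spec_Letters_Formed_from_the_Longest_Word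
  cases xs with
  | nil => simp [Letters_Formed_from_the_Longest_Word,
      Letters_Formed_from_the_Longest_Word_alt, pvOuterA]
  | cons x rest =>
    simp only [Letters_Formed_from_the_Longest_Word,
      Letters_Formed_from_the_Longest_Word_alt]
    cases hmax : PySem.List.max? (x :: rest) PySem.Str.len with
    | none =>
      rw [PySem.List.max?_eq_none_iff] at hmax
      simp at hmax
    | some lng =>
      rw [pvOuterA_eq (x :: rest) lng hmax (x :: rest) [] (by simp)]
      show (x :: rest).all (pvOK lng)
          = PySem.Set.issubset
              ((x :: rest).foldl
                (fun s w => if w ≠ lng then PySem.Set.update s w.toList else s)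
                PySem.Set.empty)
              (PySem.Set.ofList lng.toList)
      rw [pvB_fold_eq lng (x :: rest) PySem.Set.empty]
      simp [PySem.Set.empty, PySem.Set.issubset]
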